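-- pv_equiv track=rewrite | github.com/luizacamposss/codigosdoprof | 01-atividade-corrigindo-codigo.py | positivo_ou_negativo
-- ===== SOURCE A (Python) =====
-- def positivo_ou_negativo(n2):
--     contador_negativos = 0
--     contador_positivos = 0
--
--     for numero in n2:
--         if numero <= 0:
--             contador_negativos += 1
--         else:
--             contador_positivos += 1
--     return contador_negativos, contador_positivos
-- ===== SOURCE B (Python) =====
-- def positivo_ou_negativo(n2):
--     seq = sorted(n2)
--     lo, hi = 0, len(seq)
--     while lo < hi:
--         mid = (lo + hi) // 2
--         if seq[mid] <= 0:
--             lo = mid + 1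
--         else:
--             hi = mid
--     return lo, len(seq) - lo
-- ===== Notes on version B (the rewrite author's own statement) =====
-- stated objective: alternative
-- what changed: Sorts the list and binary-searches for the first positive element: the split index is the non-positive count and the rest are positive, replacing the dual-counter accumulation loop (counts are permutation-invariant, so sorting is sound).
import Mathlib
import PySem

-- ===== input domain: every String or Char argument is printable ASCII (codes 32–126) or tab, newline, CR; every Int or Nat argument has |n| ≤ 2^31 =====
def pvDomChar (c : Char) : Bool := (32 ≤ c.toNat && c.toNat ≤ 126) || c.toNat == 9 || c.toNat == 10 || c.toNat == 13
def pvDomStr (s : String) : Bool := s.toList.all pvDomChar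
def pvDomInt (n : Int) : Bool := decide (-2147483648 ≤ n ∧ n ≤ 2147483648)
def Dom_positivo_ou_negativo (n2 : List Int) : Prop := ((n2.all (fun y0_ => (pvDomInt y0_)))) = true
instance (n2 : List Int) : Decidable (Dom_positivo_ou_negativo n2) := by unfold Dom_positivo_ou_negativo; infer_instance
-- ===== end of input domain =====

-- B sorts the list and binary-searches for the first positive element; the split index is the non-positive count (alternative algorithm, counts are permutation-invariant).

-- ===== PORT A =====
def positivo_ou_negativo (n2 : List Int) : Int × Int :=
  n2.foldl (fun (acc : Int × Int) numero =>
    if numero ≤ 0 then (acc.1 + 1, acc.2) else (acc.1, acc.2 + 1)) (0, 0)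

-- ===== PORT B =====
-- the while loop of Source B: binary search for the first index holding a positive element
-- (seq[mid] is always in range when lo < hi ≤ len, so getD's default is never used)
def pvBsearch (seq : List Int) (lo hi : Nat) : Nat :=
  if lo < hi then
    let mid := (lo + hi) / 2
    if seq.getD mid 0 ≤ 0 then pvBsearch seq (mid + 1) hi
    else pvBsearch seq lo mid
  else lo
termination_by hi - lo
decreasing_by all_goals omega

def positivo_ou_negativo_alt (n2 : List Int) : Int × Int :=
  let seq := PySem.List.sorted n2 (fun x => x) false
  let lo := pvBsearch seq 0 seq.length
  ((lo : Int), (seq.length : Int) - (lo : Int))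

-- ===== PRECONDITION & SPEC =====
def Spec_positivo_ou_negativo (n2 : List Int) (out : Int × Int) : Prop := out = positivo_ou_negativo_alt n2
instance (n2 : List Int) (out : Int × Int) : Decidable (Spec_positivo_ou_negativo n2 out) := by unfold Spec_positivo_ou_negativo; infer_instance

-- ===== CLAIM (what is proved, stated in full; the proofs are below) =====
def Claim_equal_positivo_ou_negativo : Prop := ∀ (n2 : List Int), Dom_positivo_ou_negativo n2 → Spec_positivo_ou_negativo n2 (positivo_ou_negativo n2)

-- ===== LEMMAS AND PROOFS =====

-- A's fold computes (countP (≤0), countP (>0))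
lemma fold_counts (n2 : List Int) (a b : Int) :
    n2.foldl (fun (acc : Int × Int) numero =>
      if numero ≤ 0 then (acc.1 + 1, acc.2) else (acc.1, acc.2 + 1)) (a, b)
    = (a + ((n2.countP (fun x => x ≤ 0) : Int)),
       b + ((n2.countP (fun x => 0 < x) : Int))) := by
  induction n2 generalizing a b with
  | nil => simp
  | cons x xs ih =>
    simp only [List.foldl, List.countP_cons]
    by_cases h : x ≤ 0
    · have h2 : ¬ (0 < x) := by omega
      simp [h, h2, ih]; ring
    · have h2 : (0 < x) := by omega
      simp [h, h2, ih]; ring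

-- in a ≤-sorted list, an index is < countP (≤0) iff its element is ≤ 0
lemma sorted_getD_le_iff (s : List Int) (hs : s.Pairwise (· ≤ ·)) (i : Nat) (hi : i < s.length) :
    (s.getD i 0 ≤ 0 ↔ i < s.countP (fun x => x ≤ 0)) := by
  induction s generalizing i with
  | nil => simp at hi
  | cons x xs ih =>
    have hs' : xs.Pairwise (· ≤ ·) := hs.tail
    by_cases hx : x ≤ 0
    · cases i with
      | zero => simp [hx]
      | succ j =>
        have hj : j < xs.length := by simpa using hi
        have := ih hs' j hj
        simp only [List.countP_cons, hx]
        simpa [List.getD] using this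
    · -- x > 0 and sorted ⇒ every element > 0, countP = 0
      have hall : ∀ y ∈ x :: xs, ¬ (y ≤ 0) := by
        intro y hy
        rcases List.mem_cons.mp hy with h | hy
        · subst h; exact hx
        · have hxy : x ≤ y := (List.pairwise_cons.mp hs).1 y hy
          omega
      have hc : (x :: xs).countP (fun y => y ≤ 0) = 0 := by
        rw [List.countP_eq_zero]
        intro y hy; simpa using hall y hy
      rw [hc]
      constructor
      · intro h
        have hm : (x :: xs).getD i 0 ∈ (x :: xs) := by
          rw [List.getD_eq_getElem _ _ hi]; exact List.getElem_mem hi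
        exact absurd h (hall _ hm)
      · intro h; omega

-- binary search returns countP (≤0) on a sorted list
lemma pvBsearch_eq (s : List Int) (hs : s.Pairwise (· ≤ ·)) (lo hi : Nat)
    (h1 : lo ≤ s.countP (fun x => x ≤ 0)) (h2 : s.countP (fun x => x ≤ 0) ≤ hi)
    (h3 : hi ≤ s.length) :
    pvBsearch s lo hi = s.countP (fun x => x ≤ 0) := by
  obtain ⟨n, hfuel⟩ : ∃ n, hi - lo ≤ n := ⟨hi - lo, le_rfl⟩
  induction n generalizing lo hi with
  | zero =>
    unfold pvBsearch
    have : ¬ lo < hi := by omega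
    simp [this]; omega
  | succ k ih =>
    unfold pvBsearch
    by_cases hlt : lo < hi
    · simp only [hlt, if_true]
      have hmid : (lo + hi) / 2 < s.length := by omega
      have hiff := sorted_getD_le_iff s hs ((lo + hi) / 2) hmid
      by_cases hm : s.getD ((lo + hi) / 2) 0 ≤ 0
      · simp only [hm, if_true]
        have hc := hiff.mp hm
        exact ih ((lo + hi) / 2 + 1) hi (by omega) h2 h3 (by omega)
      · simp only [hm, if_false]
        have hc : ¬ ((lo + hi) / 2 < s.countP (fun x => x ≤ 0)) := fun h => hm (hiff.mpr h)
        exact ih lo ((lo + hi) / 2) h1 (by omega) (by omega) (by omega)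
    · simp [hlt]; omega

lemma countP_split (n2 : List Int) :
    n2.countP (fun x => x ≤ 0) + n2.countP (fun x => 0 < x) = n2.length := by
  induction n2 with
  | nil => simp
  | cons x xs ih =>
    simp only [List.countP_cons, List.length_cons]
    by_cases h : x ≤ 0
    · have h2 : ¬ (0 < x) := by omega
      simp [h, h2]; omega
    · have h2 : (0 < x) := by omega
      simp [h, h2]; omega

theorem positivo_ou_negativo_spec : Claim_equal_positivo_ou_negativo := by
  intro n2 _
  unfold Spec_positivo_ou_negativo positivo_ou_negativo positivo_ou_negativo_alt
  rw [fold_counts]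
  have hperm : (PySem.List.sorted n2 (fun x => x) false).Perm n2 :=
    PySem.List.sorted_perm n2 (fun x => x) false
  have hpw : (PySem.List.sorted n2 (fun x => x) false).Pairwise (· ≤ ·) := by
    simpa using PySem.List.sorted_pairwise n2 (fun x => x)
  have hb := pvBsearch_eq (PySem.List.sorted n2 (fun x => x) false) hpw 0
    (PySem.List.sorted n2 (fun x => x) false).length (Nat.zero_le _)
    (List.countP_le_length) le_rfl
  have hc : (PySem.List.sorted n2 (fun x => x) false).countP (fun x => x ≤ 0)
      = n2.countP (fun x => x ≤ 0) := hperm.countP_eq _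
  have hlen : (PySem.List.sorted n2 (fun x => x) false).length = n2.length := hperm.length_eq
  have hsum := countP_split n2
  rw [hc] at hb
  rw [hlen] at hb
  simp only [hlen, hb]
  refine Prod.ext ?_ ?_ <;> simp <;> omega
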